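-- pv_equiv track=rewrite | github.com/tormobr/advent_of_code_2022 | 17/solution.py | can_move_left
-- ===== SOURCE A (Python) =====
-- ROCKS = [
--     [["#", "#", "#", "#"]],
--
--     [[".", "#", "."],
--      ["#", "#", "#"],
--      [".", "#", "."]],
--
--     [[".", ".", "#"],
--      [".", ".", "#"],
--      ["#", "#", "#"]],
--
--     [["#"],
--      ["#"],
--      ["#"],
--      ["#"]],
--
--     [["#", "#"],
--      ["#", "#"]]
-- ]
--
-- def can_move_left(current_rock, solid, current_x, current_y):
--     for y in range(len(current_rock)):
--         if current_rock == ROCKS[1]: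
--             if y == 0 or y == 2:
--                 if current_x <= 0 or (current_x, current_y + y) in solid:
--                     return False
--             elif y == 1:
--                 if current_x <= 0 or (current_x - 1, current_y + y) in solid:
--                     return False
--         elif current_rock == ROCKS[2]:
--             if y == 0 or y == 1:
--                 if current_x <= 0 or (current_x + 1, current_y + y) in solid:
--                     return False
--             elif y == 2:
--                 if current_x <= 0 or (current_x - 1, current_y + y) in solid:
--                     return False
--         else:
--             if current_x <= 0 or (current_x - 1, current_y + y) in solid:
--                 return False
--     return True
-- ===== SOURCE B (Python) =====
-- ROCKS = [
--     [["#", "#", "#", "#"]],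
--
--     [[".", "#", "."],
--      ["#", "#", "#"],
--      [".", "#", "."]],
--
--     [[".", ".", "#"],
--      [".", ".", "#"],
--      ["#", "#", "#"]],
--
--     [["#"],
--      ["#"],
--      ["#"],
--      ["#"]],
--
--     [["#", "#"],
--      ["#", "#"]]
-- ]
--
--
-- def can_move_left(current_rock, solid, current_x, current_y):
--     # Inverted traversal: instead of scanning solid once per rock row, make a
--     # single pass over solid and decide arithmetically whether each solid cell
--     # is one of the cells the rock would probe when shifting left.
--     n = len(current_rock)
--     if n == 0:
--         return True
--     if current_x <= 0:
--         return False
--     if current_rock == ROCKS[1]: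
--         offs = [0, -1, 0]
--     elif current_rock == ROCKS[2]:
--         offs = [1, 1, -1]
--     else:
--         offs = [-1] * n
--     for sx, sy in solid:
--         dy = sy - current_y
--         if 0 <= dy < n and sx == current_x + offs[dy]:
--             return False
--     return True
-- ===== Notes on version B (the rewrite author's own statement) =====
-- stated objective: alternative
-- what changed: Inverts the loop structure: instead of A's per-row shape-branch chain that scans solid once per rock row, B hoists the wall check and makes a single pass over solid, deciding arithmetically (row offset sy - current_y into a precomputed offset table) whether each solid cell blocks the shift.
import Mathlib
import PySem

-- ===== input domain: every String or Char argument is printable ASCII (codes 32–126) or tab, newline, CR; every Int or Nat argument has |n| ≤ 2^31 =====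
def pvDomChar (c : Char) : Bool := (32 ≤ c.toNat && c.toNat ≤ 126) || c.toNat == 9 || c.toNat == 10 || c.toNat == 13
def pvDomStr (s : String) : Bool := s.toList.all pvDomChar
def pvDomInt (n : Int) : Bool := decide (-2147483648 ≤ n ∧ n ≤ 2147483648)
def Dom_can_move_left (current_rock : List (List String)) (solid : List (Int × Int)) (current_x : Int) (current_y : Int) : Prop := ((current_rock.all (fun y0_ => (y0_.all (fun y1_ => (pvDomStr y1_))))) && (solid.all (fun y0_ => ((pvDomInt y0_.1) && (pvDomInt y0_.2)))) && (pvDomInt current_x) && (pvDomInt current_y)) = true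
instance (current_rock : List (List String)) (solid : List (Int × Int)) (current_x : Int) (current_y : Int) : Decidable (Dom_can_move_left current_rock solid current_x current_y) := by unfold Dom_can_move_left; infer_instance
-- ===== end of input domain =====

-- B inverts A's loop structure: instead of scanning solid once per rock row through a
-- shape-branch chain, it hoists the wall check and makes ONE pass over solid, deciding
-- arithmetically per solid cell whether it blocks the shift; objective: alternative.

-- ===== PORT A =====
-- module constant ROCKS[1] (the plus shape)
def pvROCKS1 : List (List String) :=
  [[".", "#", "."], ["#", "#", "#"], [".", "#", "."]]
-- module constant ROCKS[2] (the J shape)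
def pvROCKS2 : List (List String) :=
  [[".", ".", "#"], [".", ".", "#"], ["#", "#", "#"]]

-- the 'for y in range(len(current_rock))' loop of A, recursing on the remaining y values
def canMoveLeftGo (current_rock : List (List String)) (solid : List (Int × Int))
    (current_x : Int) (current_y : Int) : List Int → Bool
  | [] => true
  | y :: ys =>
    if current_rock = pvROCKS1 then
      if y = 0 ∨ y = 2 then
        if current_x ≤ 0 ∨ (current_x, current_y + y) ∈ solid then false
        else canMoveLeftGo current_rock solid current_x current_y ys
      else if y = 1 then
        if current_x ≤ 0 ∨ (current_x - 1, current_y + y) ∈ solid then false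
        else canMoveLeftGo current_rock solid current_x current_y ys
      else canMoveLeftGo current_rock solid current_x current_y ys
    else if current_rock = pvROCKS2 then
      if y = 0 ∨ y = 1 then
        if current_x ≤ 0 ∨ (current_x + 1, current_y + y) ∈ solid then false
        else canMoveLeftGo current_rock solid current_x current_y ys
      else if y = 2 then
        if current_x ≤ 0 ∨ (current_x - 1, current_y + y) ∈ solid then false
        else canMoveLeftGo current_rock solid current_x current_y ys
      else canMoveLeftGo current_rock solid current_x current_y ys
    else
      if current_x ≤ 0 ∨ (current_x - 1, current_y + y) ∈ solid then false
      else canMoveLeftGo current_rock solid current_x current_y ys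

def can_move_left (current_rock : List (List String)) (solid : List (Int × Int)) (current_x : Int) (current_y : Int) : Bool :=
  canMoveLeftGo current_rock solid current_x current_y
    (PySem.List.pyRange 0 current_rock.length 1)

-- ===== PORT B =====
-- B's 'for sx, sy in solid' loop with early return False.
-- offs[dy] is indexed only under the guard 0 ≤ dy < n with offs.length = n at every
-- call site, so getD with in-range index is exact for Python's offs[dy].
def canMoveLeftAltGo (n : Nat) (offs : List Int) (current_x : Int) (current_y : Int) :
    List (Int × Int) → Bool
  | [] => true
  | (sx, sy) :: rest =>
    let dy := sy - current_y
    if 0 ≤ dy ∧ dy < (n : Int) ∧ sx = current_x + offs.getD dy.toNat 0 then false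
    else canMoveLeftAltGo n offs current_x current_y rest

-- the offs table chosen by B's elif chain (n = len(current_rock))
def pvOffs (current_rock : List (List String)) : List Int :=
  if current_rock = pvROCKS1 then [0, -1, 0]
  else if current_rock = pvROCKS2 then [1, 1, -1]
  else List.replicate current_rock.length (-1)

def can_move_left_alt (current_rock : List (List String)) (solid : List (Int × Int)) (current_x : Int) (current_y : Int) : Bool :=
  if current_rock.length = 0 then true
  else if current_x ≤ 0 then false
  else canMoveLeftAltGo current_rock.length (pvOffs current_rock) current_x current_y solid

-- ===== PRECONDITION & SPEC =====
def Spec_can_move_left (current_rock : List (List String)) (solid : List (Int × Int)) (current_x : Int) (current_y : Int) (out : Bool) : Prop := out = can_move_left_alt current_rock solid current_x current_y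
instance (current_rock : List (List String)) (solid : List (Int × Int)) (current_x : Int) (current_y : Int) (out : Bool) : Decidable (Spec_can_move_left current_rock solid current_x current_y out) := by unfold Spec_can_move_left; infer_instance

-- ===== CLAIM (what is proved, stated in full; the proofs are below) =====
def Claim_equal_can_move_left : Prop := ∀ (current_rock : List (List String)) (solid : List (Int × Int)) (current_x : Int) (current_y : Int), Dom_can_move_left current_rock solid current_x current_y → Spec_can_move_left current_rock solid current_x current_y (can_move_left current_rock solid current_x current_y)

-- ===== LEMMAS AND PROOFS =====

-- A's loop in the generic (non-plus, non-J) case is an all() of the fixed (-1)-offset check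
theorem canMoveLeftGo_generic (rock : List (List String)) (solid : List (Int × Int))
    (cx cy : Int) (h1 : rock ≠ pvROCKS1) (h2 : rock ≠ pvROCKS2) (ys : List Int) :
    canMoveLeftGo rock solid cx cy ys
      = ys.all (fun y => !(decide (cx ≤ 0) || decide ((cx - 1, cy + y) ∈ solid))) := by
  induction ys with
  | nil => rfl
  | cons y ys ih =>
    simp only [canMoveLeftGo, h1, h2, if_false, List.all_cons, ih]
    by_cases h : cx ≤ 0 ∨ (cx - 1, cy + y) ∈ solid
    · rcases h with h | h <;> simp [h]
    · rw [not_or] at h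
      simp [h.2]

-- B's loop over solid, as a negated any()
theorem canMoveLeftAltGo_eq_any (n : Nat) (offs : List Int) (cx cy : Int)
    (solid : List (Int × Int)) :
    canMoveLeftAltGo n offs cx cy solid
      = !solid.any (fun p => decide (0 ≤ p.2 - cy ∧ p.2 - cy < (n : Int) ∧
          p.1 = cx + offs.getD (p.2 - cy).toNat 0)) := by
  induction solid with
  | nil => rfl
  | cons p rest ih =>
    obtain ⟨sx, sy⟩ := p
    simp only [canMoveLeftAltGo, List.any_cons]
    by_cases h : 0 ≤ sy - cy ∧ sy - cy < (n : Int) ∧ sx = cx + offs.getD (sy - cy).toNat 0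
    · rw [if_pos h, decide_eq_true h]
      simp
    · rw [if_neg h, decide_eq_false h, ih]
      simp

-- loop inversion: scanning solid for a matching row = scanning rows for a member of solid
theorem any_solid_eq_any_range (n : Nat) (offs : List Int) (cx cy : Int)
    (solid : List (Int × Int)) :
    solid.any (fun p => decide (0 ≤ p.2 - cy ∧ p.2 - cy < (n : Int) ∧
        p.1 = cx + offs.getD (p.2 - cy).toNat 0))
      = (List.range n).any (fun y => decide ((cx + offs.getD y 0, cy + (y : Int)) ∈ solid)) := by
  rw [Bool.eq_iff_iff]
  simp only [List.any_eq_true, decide_eq_true_eq, List.mem_range]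
  constructor
  · rintro ⟨⟨px, py⟩, hp, h0, hn, hx⟩
    refine ⟨(py - cy).toNat, by omega, ?_⟩
    have h2 : cy + ((py - cy).toNat : Int) = py := by omega
    rw [h2, ← hx]
    exact hp
  · rintro ⟨y, hy, hmem⟩
    refine ⟨(cx + offs.getD y 0, cy + (y : Int)), hmem, ?_⟩
    have h2 : cy + (y : Int) - cy = (y : Int) := by ring
    simp only [h2]
    refine ⟨by positivity, by exact_mod_cast hy, by simp⟩

-- ===== VERDICT (by name: the statement is the Claim_ definition above) =====
theorem can_move_left_spec : Claim_equal_can_move_left := by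
  intro rock solid cx cy _
  unfold Spec_can_move_left
  by_cases h1 : rock = pvROCKS1
  · subst h1
    show canMoveLeftGo _ _ _ _ (PySem.List.pyRange 0 3 1) = _
    have hr : PySem.List.pyRange 0 3 1 = [0, 1, 2] := by decide
    rw [hr]
    simp only [can_move_left_alt, canMoveLeftAltGo_eq_any, any_solid_eq_any_range, pvOffs]
    by_cases hcx : cx ≤ 0
    · simp [hcx, canMoveLeftGo, pvROCKS1]
    · simp only [canMoveLeftGo, hcx, false_or, if_true, pvROCKS1]
      norm_num [List.range_succ]
      by_cases m0 : (cx, cy + 0) ∈ solid <;>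
        by_cases m1 : (cx - 1, cy + 1) ∈ solid <;>
          by_cases m2 : (cx, cy + 2) ∈ solid <;>
            simp_all [sub_eq_add_neg]
  · by_cases h2 : rock = pvROCKS2
    · subst h2
      show canMoveLeftGo _ _ _ _ (PySem.List.pyRange 0 3 1) = _
      have hr : PySem.List.pyRange 0 3 1 = [0, 1, 2] := by decide
      rw [hr]
      simp only [can_move_left_alt, canMoveLeftAltGo_eq_any, any_solid_eq_any_range, pvOffs]
      by_cases hcx : cx ≤ 0
      · simp [hcx, canMoveLeftGo, pvROCKS2, pvROCKS1]
      · simp only [canMoveLeftGo, hcx, false_or, pvROCKS2, pvROCKS1]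
        norm_num [List.range_succ]
        by_cases m0 : (cx + 1, cy + 0) ∈ solid <;>
          by_cases m1 : (cx + 1, cy + 1) ∈ solid <;>
            by_cases m2 : (cx - 1, cy + 2) ∈ solid <;>
              simp_all [sub_eq_add_neg]
    · show can_move_left rock solid cx cy = can_move_left_alt rock solid cx cy
      unfold can_move_left can_move_left_alt pvOffs
      rw [canMoveLeftGo_generic rock solid cx cy h1 h2,
        if_neg h1, if_neg h2, canMoveLeftAltGo_eq_any, any_solid_eq_any_range]
      by_cases hn : rock.length = 0
      · simp [hn, PySem.List.pyRange]
      · simp only [hn, if_false]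
        by_cases hcx : cx ≤ 0
        · rw [PySem.List.pyRange_one_cons (by exact_mod_cast Nat.pos_of_ne_zero hn)]
          simp [hcx]
        · simp only [hcx, if_false, decide_false, Bool.false_or]
          rw [PySem.List.pyRange_zero_nat, List.all_map, List.all_eq_not_any_not]
          congr 1
          refine PySem.List.any_congr_mem ?_
          intro y hy
          rw [List.mem_range] at hy
          simp [hy, sub_eq_add_neg]
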